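-- pv_equiv track=rewrite | github.com/Aasthaengg/IBMdataset | Python_codes/p04001/s135789652.py | separate_and_calc
-- ===== SOURCE A (Python) =====
-- def separate_and_calc(S,plus_list):
--     if plus_list == []:
--         return array_to_num(S)
--
--     result = 0
--     for i in range(len(plus_list)):
--         if i == len(plus_list)-1:
--             result += array_to_num(S[plus_list[i]:])
--         if i == 0:
--             result += array_to_num(S[0:plus_list[i]])
--             continue
--         result += array_to_num(S[plus_list[i-1]:plus_list[i]])
--
--     return result
--
-- def array_to_num(S):
--     result = 0
--     for i in range(len(S)):
--         result += int(S[len(S) -1 - i]) * (10**(i))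
--     return result
-- ===== SOURCE B (Python) =====
-- def separate_and_calc(S, plus_list):
--     n = len(S)
--     # prefix table: H[k] = positional value of S[:k]; built once, so no per-chunk re-scan
--     H = [0]
--     acc = 0
--     for x in S:
--         acc = acc * 10 + int(x)
--         H.append(acc)
--     def clamp(i):
--         if i < 0:
--             i += n
--         return min(max(i, 0), n)
--     bounds = [0] + [clamp(p) for p in plus_list] + [n]
--     total = 0
--     for a, b in zip(bounds, bounds[1:]):
--         if a < b:
--             total += H[b] - H[a] * 10 ** (b - a)
--     return total
-- ===== Notes on version B (the rewrite author's own statement) =====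
-- stated objective: alternative
-- what changed: B precomputes a prefix positional-value table H (H[k] = value of S[:k]) in one pass and evaluates each chunk S[a:b] arithmetically as H[b] - H[a]*10^(b-a) over explicitly clamped boundaries, so A's per-chunk digit re-scan (array_to_num on every slice, with i==0/i==last special cases) disappears.
import Mathlib
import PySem

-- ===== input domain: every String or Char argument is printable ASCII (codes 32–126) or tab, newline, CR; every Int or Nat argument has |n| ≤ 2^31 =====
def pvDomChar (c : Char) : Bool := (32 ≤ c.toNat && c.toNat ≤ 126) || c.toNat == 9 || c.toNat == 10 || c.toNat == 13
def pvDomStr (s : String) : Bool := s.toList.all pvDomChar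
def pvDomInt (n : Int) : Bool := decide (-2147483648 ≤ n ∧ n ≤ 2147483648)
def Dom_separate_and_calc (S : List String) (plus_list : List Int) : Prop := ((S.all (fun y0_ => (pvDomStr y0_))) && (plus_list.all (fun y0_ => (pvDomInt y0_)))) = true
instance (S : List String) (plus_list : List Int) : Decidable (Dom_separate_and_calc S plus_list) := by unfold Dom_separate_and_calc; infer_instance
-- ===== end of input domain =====

-- B replaces A's per-chunk digit re-scan (array_to_num on each slice with i==0/i==last special
-- cases) by a prefix positional-value table H built once, each chunk evaluated arithmetically as
-- H[b] - H[a]*10^(b-a) over explicitly clamped boundaries.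


-- ===== PORT A =====
-- array_to_num: result += int(S[len(S)-1-i]) * 10**i  (int() modelled by ofStr?; Pre_ excludes the none case)
def pvA_arrayToNum (S : List String) : Int :=
  (PySem.List.pyRange 0 (S.length : Int) 1).foldl
    (fun result i =>
      result + (PySem.Int.ofStr? (PySem.List.pyGetD S ((S.length : Int) - 1 - i) "")).getD 0 * 10 ^ i.toNat)
    0

def separate_and_calc (S : List String) (plus_list : List Int) : Int :=
  if plus_list = [] then pvA_arrayToNum S
  else
    (PySem.List.pyRange 0 (plus_list.length : Int) 1).foldl
      (fun result i =>
        let result :=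
          if i = (plus_list.length : Int) - 1 then
            result + pvA_arrayToNum (PySem.List.slice S (some (PySem.List.pyGetD plus_list i 0)) none)
          else result
        if i = 0 then
          result + pvA_arrayToNum (PySem.List.slice S (some 0) (some (PySem.List.pyGetD plus_list i 0)))
        else
          result + pvA_arrayToNum (PySem.List.slice S
            (some (PySem.List.pyGetD plus_list (i - 1) 0)) (some (PySem.List.pyGetD plus_list i 0))))
      0

-- ===== PORT B =====
-- clamp(i): Python's slice-bound normalisation, written out as in Source B
def pvClamp (n i : Int) : Int :=
  let i2 := if i < 0 then i + n else i
  min (max i2 0) n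

def separate_and_calc_alt (S : List String) (plus_list : List Int) : Int :=
  let n : Int := (S.length : Int)
  -- H = [0]; acc = 0; for x in S: acc = acc*10 + int(x); H.append(acc)
  let Hacc := S.foldl (fun p x =>
      let acc := p.2 * 10 + (PySem.Int.ofStr? x).getD 0
      (p.1 ++ [acc], acc)) ([(0 : Int)], (0 : Int))
  let H := Hacc.1
  let bounds : List Int := 0 :: (plus_list.map (pvClamp n) ++ [n])
  (bounds.zip bounds.tail).foldl
    (fun total p =>
      if p.1 < p.2 then total + (H.getD p.2.toNat 0 - H.getD p.1.toNat 0 * 10 ^ (p.2 - p.1).toNat)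
      else total) 0

-- ===== PRECONDITION & SPEC =====
-- A applies int() to every element of S (the chunks always cover S); it raises ValueError exactly
-- when some element of S does not parse as a Python int. Pre_ excludes exactly those inputs.
def Pre_separate_and_calc (S : List String) (_plus_list : List Int) : Prop :=
  ∀ x ∈ S, (PySem.Int.ofStr? x).isSome = true
instance (S : List String) (plus_list : List Int) : Decidable (Pre_separate_and_calc S plus_list) := by
  unfold Pre_separate_and_calc; infer_instance

def pvWitness_separate_and_calc : List String × List Int := (["1", "2", "3"], [1])

def Spec_separate_and_calc (S : List String) (plus_list : List Int) (out : Int) : Prop := out = separate_and_calc_alt S plus_list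
instance (S : List String) (plus_list : List Int) (out : Int) : Decidable (Spec_separate_and_calc S plus_list out) := by unfold Spec_separate_and_calc; infer_instance

-- ===== CLAIM (what is proved, stated in full; the proofs are below) =====
def Claim_equal_separate_and_calc : Prop := ∀ (S : List String) (plus_list : List Int), Dom_separate_and_calc S plus_list → Pre_separate_and_calc S plus_list → Spec_separate_and_calc S plus_list (separate_and_calc S plus_list)

-- ===== LEMMAS AND PROOFS =====

-- digit value of one element
def pvV (x : String) : Int := (PySem.Int.ofStr? x).getD 0

-- the common positional value of a chunk
def pvN : List String → Int
  | [] => 0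
  | x :: t => pvV x * 10 ^ t.length + pvN t

lemma range_sum_eq_pvN (l : List String) :
    ((List.range l.length).map
      (fun k => pvV (l.getD (l.length - 1 - k) "") * 10 ^ k)).sum = pvN l := by
  induction l with
  | nil => simp [pvN]
  | cons x t ih =>
    have hpeel : List.range (t.length + 1) = List.range t.length ++ [t.length] := List.range_succ
    simp only [List.length_cons, hpeel, List.map_append, List.sum_append, List.map_cons,
      List.map_nil, List.sum_cons, List.sum_nil, pvN]
    have hcong : ∀ k ∈ List.range t.length,
        pvV ((x :: t).getD (t.length + 1 - 1 - k) "") * 10 ^ k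
          = pvV (t.getD (t.length - 1 - k) "") * 10 ^ k := by
      intro k hk
      have hk' : k < t.length := List.mem_range.mp hk
      have : t.length + 1 - 1 - k = (t.length - 1 - k) + 1 := by omega
      rw [this, List.getD_cons_succ]
    rw [List.map_congr_left hcong, ih]
    simp only [Nat.add_sub_cancel, Nat.sub_self, List.getD_cons_zero]
    ring

lemma a2n_eq_pvN (l : List String) : pvA_arrayToNum l = pvN l := by
  unfold pvA_arrayToNum
  rw [PySem.List.foldl_add
        (g := fun i => (PySem.Int.ofStr? (PySem.List.pyGetD l ((l.length : Int) - 1 - i) "")).getD 0 * 10 ^ i.toNat)]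
  rw [PySem.List.pyRange_one, List.map_map]
  have hcong : ∀ k ∈ List.range (((l.length : Int) - 0).toNat),
      ((fun i => (PySem.Int.ofStr? (PySem.List.pyGetD l ((l.length : Int) - 1 - i) "")).getD 0 * 10 ^ i.toNat) ∘
        fun k : Nat => (0 : Int) + k) k
        = pvV (l.getD (l.length - 1 - k) "") * 10 ^ k := by
    intro k hk
    have hk' : k < l.length := by
      have := List.mem_range.mp hk
      omega
    have h1 : (l.length : Int) - 1 - ((0 : Int) + k) = ((l.length - 1 - k : Nat) : Int) := by
      omega
    have h2 : ((0 : Int) + (k : Int)).toNat = k := by omega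
    simp only [Function.comp, h1, h2, PySem.List.pyGetD_natCast, pvV]
  rw [List.map_congr_left hcong]
  have : ((l.length : Int) - 0).toNat = l.length := by omega
  rw [this, range_sum_eq_pvN]
  ring

-- S[a:] = S[a:len(S)]
lemma slice_to_len (S : List String) (a : Int) :
    PySem.List.slice S (some a) (some (S.length : Int)) = PySem.List.slice S (some a) none := by
  simp [PySem.List.slice, PySem.List.clampIdx]
  split_ifs <;> omega

-- value of one chunk
def pvChunk (S : List String) (a b : Int) : Int := pvN (PySem.List.slice S (some a) (some b))

-- A's total after the first boundary prev: middle chunks then the open-ended last chunk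
def pvTail (S : List String) (prev : Int) : List Int → Int
  | [] => pvN (PySem.List.slice S (some prev) none)
  | q :: qs => pvChunk S prev q + pvTail S q qs

-- per-index contribution of A's loop body, in Nat index form
def pvCon (S : List String) (prev : Int) (qs : List Int) (k : Nat) : Int :=
  (if k = qs.length - 1 then pvN (PySem.List.slice S (some (qs.getD k 0)) none) else 0)
  + pvChunk S (if k = 0 then prev else qs.getD (k - 1) 0) (qs.getD k 0)

lemma conSum_eq_pvTail (S : List String) (qs : List Int) : ∀ prev : Int, qs ≠ [] →
    ((List.range qs.length).map (pvCon S prev qs)).sum = pvTail S prev qs := by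
  induction qs with
  | nil => intro prev h; exact absurd rfl h
  | cons q qs ih =>
    intro prev _
    rcases qs with _ | ⟨q2, qs'⟩
    · simp [pvCon, pvTail]
      ring
    · set qs := q2 :: qs' with hqs
      have hne : qs ≠ [] := by simp [hqs]
      have hlen : (q :: qs).length = qs.length + 1 := rfl
      rw [hlen, List.range_succ_eq_map]
      simp only [List.map_cons, List.sum_cons, List.map_map]
      have h0 : pvCon S prev (q :: qs) 0 = pvChunk S prev q := by
        have hz : (0 : Nat) ≠ qs.length := by simp [hqs]
        simp [pvCon, hz]
      have hcong : ∀ k ∈ List.range qs.length,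
          (pvCon S prev (q :: qs) ∘ Nat.succ) k = pvCon S q qs k := by
        intro k hk
        have hk' : k < qs.length := List.mem_range.mp hk
        have hlq : 1 ≤ qs.length := by omega
        have hcond : (k + 1 = (q :: qs).length - 1) = (k = qs.length - 1) := by
          simp only [List.length_cons, Nat.add_sub_cancel]
          exact propext ⟨fun h => by omega, fun h => by omega⟩
        have hgd1 : (q :: qs).getD (k + 1) 0 = qs.getD k 0 := List.getD_cons_succ ..
        have hgd2 : (q :: qs).getD (k + 1 - 1) 0 = if k = 0 then q else qs.getD (k - 1) 0 := by
          rcases k with _ | k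
          · simp
          · simp
        simp only [Function.comp, pvCon, Nat.succ_eq_add_one, hcond, hgd1, hgd2]
        simp
      rw [List.map_congr_left hcong, ih q hne, h0]
      simp [pvTail]

lemma a_eq_pvTail (S : List String) (pl : List Int) :
    separate_and_calc S pl = pvTail S 0 pl := by
  rcases pl with _ | ⟨p, qs⟩
  · simp [separate_and_calc, pvTail, a2n_eq_pvN, PySem.List.slice_zero_start,
      PySem.List.slice_none_none]
  · set pl := p :: qs with hpl
    have hne : pl ≠ [] := by simp [hpl]
    unfold separate_and_calc
    rw [if_neg hne]
    have hbody :
        (fun (result : Int) (i : Int) =>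
          let result :=
            if i = (pl.length : Int) - 1 then
              result + pvA_arrayToNum (PySem.List.slice S (some (PySem.List.pyGetD pl i 0)) none)
            else result
          if i = 0 then
            result + pvA_arrayToNum (PySem.List.slice S (some 0) (some (PySem.List.pyGetD pl i 0)))
          else
            result + pvA_arrayToNum (PySem.List.slice S
              (some (PySem.List.pyGetD pl (i - 1) 0)) (some (PySem.List.pyGetD pl i 0))))
        = (fun (result : Int) (i : Int) => result +
            ((if i = (pl.length : Int) - 1 then
                pvA_arrayToNum (PySem.List.slice S (some (PySem.List.pyGetD pl i 0)) none)
              else 0)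
             + (if i = 0 then
                  pvA_arrayToNum (PySem.List.slice S (some 0) (some (PySem.List.pyGetD pl i 0)))
                else
                  pvA_arrayToNum (PySem.List.slice S
                    (some (PySem.List.pyGetD pl (i - 1) 0)) (some (PySem.List.pyGetD pl i 0)))))) := by
      funext result i
      split_ifs <;> simp <;> ring
    rw [hbody]
    rw [PySem.List.foldl_add
      (g := fun i : Int =>
          (if i = (pl.length : Int) - 1 then
              pvA_arrayToNum (PySem.List.slice S (some (PySem.List.pyGetD pl i 0)) none)
            else 0)
          + (if i = 0 then
              pvA_arrayToNum (PySem.List.slice S (some 0) (some (PySem.List.pyGetD pl i 0)))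
            else
              pvA_arrayToNum (PySem.List.slice S
                (some (PySem.List.pyGetD pl (i - 1) 0)) (some (PySem.List.pyGetD pl i 0)))))]
    rw [PySem.List.pyRange_one, List.map_map]
    have hcong : ∀ k ∈ List.range (((pl.length : Int) - 0).toNat),
        ((fun i : Int =>
          (if i = (pl.length : Int) - 1 then
              pvA_arrayToNum (PySem.List.slice S (some (PySem.List.pyGetD pl i 0)) none)
            else 0)
          + (if i = 0 then
              pvA_arrayToNum (PySem.List.slice S (some 0) (some (PySem.List.pyGetD pl i 0)))
            else
              pvA_arrayToNum (PySem.List.slice S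
                (some (PySem.List.pyGetD pl (i - 1) 0)) (some (PySem.List.pyGetD pl i 0))))) ∘
          fun k : Nat => (0 : Int) + k) k = pvCon S 0 pl k := by
      intro k hk
      have hk' : k < pl.length := by
        have := List.mem_range.mp hk; omega
      have hz : (0 : Int) + (k : Int) = (k : Int) := by ring
      have hc1 : ((k : Int) = (pl.length : Int) - 1) = (k = pl.length - 1) := by
        exact propext ⟨fun h => by omega, fun h => by omega⟩
      have hc2 : ((k : Int) = 0) = (k = 0) := by
        exact propext ⟨fun h => by omega, fun h => by omega⟩
      simp only [Function.comp, hz, hc1, hc2, PySem.List.pyGetD_natCast]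
      rcases Nat.eq_zero_or_pos k with hk0 | hk0
      · subst hk0
        simp [pvCon, pvChunk, a2n_eq_pvN]
      · have hm1 : (k : Int) - 1 = ((k - 1 : Nat) : Int) := by omega
        have hkne : k ≠ 0 := by omega
        simp only [hm1, PySem.List.pyGetD_natCast, pvCon, pvChunk, a2n_eq_pvN, if_neg hkne]
    rw [List.map_congr_left hcong]
    have hl : ((pl.length : Int) - 0).toNat = pl.length := by omega
    rw [hl, conSum_eq_pvTail S pl 0 hne]
    ring

-- ===== B-side lemmas =====

-- the partial accumulators appended to H by B's first loop, starting from acc = a0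
def pvScan (a0 : Int) : List String → List Int
  | [] => []
  | x :: t => (a0 * 10 + pvV x) :: pvScan (a0 * 10 + pvV x) t

-- the final accumulator of that loop
def pvLastAcc (a0 : Int) : List String → Int
  | [] => a0
  | x :: t => pvLastAcc (a0 * 10 + pvV x) t

lemma foldB_eq (S : List String) : ∀ (h0 : List Int) (a0 : Int),
    S.foldl (fun p x =>
        let acc := p.2 * 10 + (PySem.Int.ofStr? x).getD 0
        (p.1 ++ [acc], acc)) (h0, a0)
      = (h0 ++ pvScan a0 S, pvLastAcc a0 S) := by
  induction S with
  | nil => intro h0 a0; simp [pvScan, pvLastAcc]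
  | cons x t ih =>
    intro h0 a0
    simp only [List.foldl_cons, ih, pvScan, pvLastAcc, pvV, List.append_assoc,
      List.singleton_append]

lemma scan_getD (S : List String) : ∀ (a0 : Int) (k : Nat), k ≤ S.length →
    (a0 :: pvScan a0 S).getD k 0 = a0 * 10 ^ k + pvN (S.take k) := by
  induction S with
  | nil =>
    intro a0 k hk
    have : k = 0 := by simpa using hk
    subst this; simp [pvN]
  | cons x t ih =>
    intro a0 k hk
    rcases k with _ | k
    · simp [pvN]
    · have hk' : k ≤ t.length := by simpa using hk
      have hlen : (t.take k).length = k := by simp [hk']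
      simp only [pvScan, List.getD_cons_succ, ih _ k hk', List.take_succ_cons, pvN, hlen]
      ring

lemma pvN_append (u v : List String) : pvN (u ++ v) = pvN u * 10 ^ v.length + pvN v := by
  induction u with
  | nil => simp [pvN]
  | cons x t ih =>
    simp only [List.cons_append, pvN, ih, List.length_append]
    ring

-- the prefix table B builds
def pvH (S : List String) : List Int := 0 :: pvScan 0 S

lemma pvH_getD (S : List String) (k : Nat) (hk : k ≤ S.length) :
    (pvH S).getD k 0 = pvN (S.take k) := by
  have := scan_getD S 0 k hk
  simpa [pvH] using this

-- a chunk's value from the prefix table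
lemma chunk_formula (S : List String) (ca cb : Nat) (hca : ca ≤ S.length) (hcb : cb ≤ S.length) :
    pvN ((S.drop ca).take (cb - ca))
      = if ca < cb then pvN (S.take cb) - pvN (S.take ca) * 10 ^ (cb - ca) else 0 := by
  by_cases h : ca < cb
  · rw [if_pos h]
    have hsplit : S.take cb = S.take ca ++ (S.drop ca).take (cb - ca) := by
      have : cb = ca + (cb - ca) := by omega
      rw [this, List.take_add, Nat.add_sub_cancel_left]
    have hlen : ((S.drop ca).take (cb - ca)).length = cb - ca := by
      simp [List.length_take, List.length_drop]
      omega
    rw [hsplit, pvN_append, hlen]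
    ring
  · rw [if_neg h]
    have : cb - ca = 0 := by omega
    simp [this, pvN]

-- B's per-pair contribution function, read off the prefix table
def pvG (S : List String) (a b : Int) : Int :=
  if a < b then (pvH S).getD b.toNat 0 - (pvH S).getD a.toNat 0 * 10 ^ (b - a).toNat else 0

-- B's per-pair contribution at clamped Nat bounds is the chunk value
lemma contrib_eq_chunk (S : List String) (ca cb : Nat) (hca : ca ≤ S.length) (hcb : cb ≤ S.length) :
    pvG S (ca : Int) (cb : Int) = pvChunk S (ca : Int) (cb : Int) := by
  have h1 : ((cb : Int)).toNat = cb := by omega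
  have h2 : ((ca : Int)).toNat = ca := by omega
  have h3 : (((cb : Int)) - (ca : Int)).toNat = cb - ca := by omega
  have hlt : (((ca : Int)) < (cb : Int)) ↔ ca < cb := by omega
  unfold pvG
  rw [h1, h2, h3]
  unfold pvChunk
  rw [PySem.List.slice_natCast, chunk_formula S ca cb hca hcb,
    pvH_getD S ca hca, pvH_getD S cb hcb]
  by_cases h : ca < cb
  · rw [if_pos (hlt.mpr h), if_pos h]
  · rw [if_neg (fun hc => h (hlt.mp hc)), if_neg h]

-- generic pair sum over consecutive boundaries
def pvPairSum (g : Int → Int → Int) (c : Int) : List Int → Int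
  | [] => 0
  | d :: L => g c d + pvPairSum g d L

lemma zipfold_eq_pairSum (g : Int → Int → Int) (L : List Int) : ∀ (c acc : Int),
    ((c :: L).zip L).foldl (fun total p => total + g p.1 p.2) acc = acc + pvPairSum g c L := by
  induction L with
  | nil => intro c acc; simp [pvPairSum]
  | cons d L ih =>
    intro c acc
    rw [List.zip_cons_cons, List.foldl_cons, ih]
    simp only [pvPairSum]
    ring

-- pvClamp is PySem's clampIdx
lemma pvClamp_eq (S : List String) (p : Int) :
    pvClamp (S.length : Int) p = ((PySem.List.clampIdx S.length p : Nat) : Int) := by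
  simp only [pvClamp, PySem.List.clampIdx, min_def, max_def]
  split_ifs <;> omega

-- slicing at a clamped bound is slicing at the raw bound
lemma slice_clamp_left (S : List String) (q : Int) (b? : Option Int) :
    PySem.List.slice S (some ((PySem.List.clampIdx S.length q : Nat) : Int)) b?
      = PySem.List.slice S (some q) b? := by
  have h : PySem.List.clampIdx S.length ((PySem.List.clampIdx S.length q : Nat) : Int)
      = PySem.List.clampIdx S.length q := by
    simp only [PySem.List.clampIdx]
    split_ifs <;> omega
  simp only [PySem.List.slice, h]

lemma slice_clamp_right (S : List String) (a : Int) (q : Int) :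
    PySem.List.slice S (some a) (some ((PySem.List.clampIdx S.length q : Nat) : Int))
      = PySem.List.slice S (some a) (some q) := by
  have h : PySem.List.clampIdx S.length ((PySem.List.clampIdx S.length q : Nat) : Int)
      = PySem.List.clampIdx S.length q := by
    simp only [PySem.List.clampIdx]
    split_ifs <;> omega
  simp only [PySem.List.slice, h]

lemma pvTail_clamp (S : List String) (q : Int) (qs : List Int) :
    pvTail S ((PySem.List.clampIdx S.length q : Nat) : Int) qs = pvTail S q qs := by
  rcases qs with _ | ⟨r, rs⟩
  · simp only [pvTail, slice_clamp_left]
  · simp only [pvTail, pvChunk, slice_clamp_left]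

lemma main_pairs (S : List String) (qs : List Int) : ∀ c : Int, 0 ≤ c → c ≤ (S.length : Int) →
    pvPairSum (pvG S) c (qs.map (pvClamp (S.length : Int)) ++ [(S.length : Int)])
      = pvTail S c qs := by
  induction qs with
  | nil =>
    intro c hc0 hcl
    have hc : c = ((c.toNat : Nat) : Int) := by omega
    have hle : c.toNat ≤ S.length := by omega
    simp only [List.map_nil, List.nil_append, pvPairSum]
    rw [hc, contrib_eq_chunk S c.toNat S.length hle le_rfl]
    unfold pvChunk
    rw [slice_to_len]
    simp [pvTail]
  | cons q qs ih =>
    intro c hc0 hcl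
    simp only [List.map_cons, List.cons_append, pvPairSum]
    rw [pvClamp_eq S q]
    have hq0 : (0 : Int) ≤ ((PySem.List.clampIdx S.length q : Nat) : Int) := by positivity
    have hql : ((PySem.List.clampIdx S.length q : Nat) : Int) ≤ (S.length : Int) := by
      have := PySem.List.clampIdx_le S.length q
      omega
    rw [ih _ hq0 hql, pvTail_clamp]
    have hc : c = ((c.toNat : Nat) : Int) := by omega
    have hle : c.toNat ≤ S.length := by omega
    have hqle : PySem.List.clampIdx S.length q ≤ S.length := PySem.List.clampIdx_le _ _
    rw [hc, contrib_eq_chunk S c.toNat (PySem.List.clampIdx S.length q) hle hqle]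
    have hchunk : pvChunk S ((c.toNat : Nat) : Int) ((PySem.List.clampIdx S.length q : Nat) : Int)
        = pvChunk S ((c.toNat : Nat) : Int) q := by
      unfold pvChunk
      rw [slice_clamp_right]
    rw [hchunk]
    simp [pvTail]

lemma alt_eq_pvTail (S : List String) (pl : List Int) :
    separate_and_calc_alt S pl = pvTail S 0 pl := by
  unfold separate_and_calc_alt
  simp only []
  rw [foldB_eq S [0] 0]
  simp only [List.tail_cons]
  have hH : ([(0 : Int)] ++ pvScan 0 S) = pvH S := by simp [pvH]
  rw [hH]
  have hbody :
      (fun (total : Int) (p : Int × Int) =>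
        if p.1 < p.2 then
          total + ((pvH S).getD p.2.toNat 0 - (pvH S).getD p.1.toNat 0 * 10 ^ (p.2 - p.1).toNat)
        else total)
      = (fun (total : Int) (p : Int × Int) => total + pvG S p.1 p.2) := by
    funext total p
    unfold pvG
    split_ifs <;> ring
  rw [hbody, zipfold_eq_pairSum (pvG S)]
  rw [main_pairs S pl 0 le_rfl (by positivity)]
  ring

-- ===== VERDICT (by name: the statement is the Claim_ definition above) =====
theorem separate_and_calc_spec : Claim_equal_separate_and_calc := by
  intro S pl _ _
  unfold Spec_separate_and_calc
  rw [a_eq_pvTail, alt_eq_pvTail]
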